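-- pv_equiv track=rewrite | github.com/juhanfreitas/pybooking | app/criptography.py | decript
-- ===== SOURCE A (Python) =====
-- import math
--
-- def decript(cripted_message):
--     '''
--     A function that decript the message passed for it.
--
--         Parameters:
--             cripted_message (str): A string that contains the cripted message.
--
--         Returns:
--             decripted_message (str): A string that contains the decripted message.
--
--     '''
--
--     message_lists = []
--     decripted_message = ""
--
--     for i in range(math.ceil(len(cripted_message)/2)):
--         message_lists.append([])
--
--     for i in range(len(cripted_message)):
--         message_lists[i//2].append(cripted_message[i])
--
--     for section in message_lists:
--         section = section[::-1]
--         for letter in section: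
--             decripted_message += letter
--
--     decripted_message = decripted_message[::-1]
--
--     return decripted_message
-- ===== SOURCE B (Python) =====
-- def decript(cripted_message):
--     # Instead of swapping within each pair and then reversing the whole string,
--     # split into consecutive 2-char chunks and reverse only the chunk order.
--     chunks = []
--     s = cripted_message
--     while s:
--         chunks.append(s[:2])
--         s = s[2:]
--     return ''.join(reversed(chunks))
-- ===== Notes on version B (the rewrite author's own statement) =====
-- stated objective: simpler
-- what changed: Instead of distributing characters into pair-buckets by index, reversing each pair and reversing the whole string, B splits the string into consecutive 2-char chunks with a single while loop and reverses only the order of the chunks.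
import Mathlib
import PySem

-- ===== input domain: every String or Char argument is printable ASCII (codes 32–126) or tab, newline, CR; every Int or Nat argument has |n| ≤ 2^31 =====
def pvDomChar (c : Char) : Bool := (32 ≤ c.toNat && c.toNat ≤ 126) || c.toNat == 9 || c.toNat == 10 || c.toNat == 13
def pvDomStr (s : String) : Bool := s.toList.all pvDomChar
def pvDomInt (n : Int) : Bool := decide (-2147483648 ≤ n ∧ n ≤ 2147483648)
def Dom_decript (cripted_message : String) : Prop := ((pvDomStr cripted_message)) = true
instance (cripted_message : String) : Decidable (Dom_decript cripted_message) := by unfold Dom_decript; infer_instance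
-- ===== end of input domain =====

-- B replaces A's pair-internal swap + full-string reversal by a single reversal of the
-- list of consecutive 2-char chunks (objective: simpler).

-- ===== PORT A =====
-- the body of A's second loop: message_lists[i//2].append(cripted_message[i])
def decriptStep (cs : List Char) (ls : List (List Char)) (i : Nat) : List (List Char) :=
  ls.set (i / 2) (ls.getD (i / 2) [] ++ [cs.getD i ' '])

def decript (cripted_message : String) : String :=
  let cs := cripted_message.toList
  -- for i in range(math.ceil(len/2)): message_lists.append([])
  let message_lists0 := (List.range ((cs.length + 1) / 2)).map (fun _ => ([] : List Char))
  -- for i in range(len): message_lists[i//2].append(cripted_message[i])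
  let message_lists := (List.range cs.length).foldl (decriptStep cs) message_lists0
  -- for section in message_lists: section = section[::-1]; for letter in section: decripted += letter
  let decripted := message_lists.foldl
    (fun acc sec => (sec.reverse).foldl (fun a c => a ++ [c]) acc) ([] : List Char)
  -- decripted_message = decripted_message[::-1]
  String.mk decripted.reverse

-- ===== PORT B =====
-- the while loop of B: chunks.append(s[:2]); s = s[2:]
def decriptChunks : List Char → List (List Char)
  | [] => []
  | [a] => [[a]]                        -- s[:2] on a 1-char tail, s[2:] = ''
  | a :: b :: rest => [a, b] :: decriptChunks rest   -- s[:2], then continue on s[2:]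

def decript_alt (cripted_message : String) : String :=
  -- ''.join(reversed(chunks))
  String.mk ((decriptChunks cripted_message.toList).reverse).flatten

-- ===== PRECONDITION & SPEC =====
def Spec_decript (cripted_message : String) (out : String) : Prop := out = decript_alt cripted_message
instance (cripted_message : String) (out : String) : Decidable (Spec_decript cripted_message out) := by unfold Spec_decript; infer_instance

-- ===== CLAIM (what is proved, stated in full; the proofs are below) =====
def Claim_equal_decript : Prop := ∀ (cripted_message : String), Dom_decript cripted_message → Spec_decript cripted_message (decript cripted_message)

-- ===== LEMMAS AND PROOFS =====

theorem foldl_push (l acc : List Char) :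
    l.foldl (fun a c => a ++ [c]) acc = acc ++ l := by
  induction l generalizing acc with
  | nil => simp
  | cons c l ih => simp [List.foldl, ih, List.append_assoc]

theorem foldl_revapp (L : List (List Char)) (acc : List Char) :
    L.foldl (fun acc sec => (sec.reverse).foldl (fun a c => a ++ [c]) acc) acc
      = acc ++ (L.map List.reverse).flatten := by
  induction L generalizing acc with
  | nil => simp
  | cons sec L ih => rw [List.foldl_cons, foldl_push, ih, List.append_assoc]; simp

-- one fold step on a shifted index acts on the tail
theorem decriptStep_shift (cs : List Char) (h : List Char) (t : List (List Char)) (i : Nat) :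
    decriptStep cs (h :: t) (i + 2) = h :: decriptStep (cs.drop 2) t i := by
  have hdiv : (i + 2) / 2 = i / 2 + 1 := by omega
  simp [decriptStep, hdiv, List.getD, List.getElem?_drop]
  rw [Nat.add_comm 2 i]

theorem fill_shift (cs : List Char) (l : List Nat) (h : List Char) (t : List (List Char)) :
    (l.map (fun i => i + 2)).foldl (decriptStep cs) (h :: t)
      = h :: l.foldl (decriptStep (cs.drop 2)) t := by
  induction l generalizing t with
  | nil => simp
  | cons i l ih => simp [List.foldl, decriptStep_shift, ih]

theorem fill_eq : (cs : List Char) →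
    (List.range cs.length).foldl (decriptStep cs)
        (List.replicate ((cs.length + 1) / 2) ([] : List Char))
      = decriptChunks cs
  | [] => by simp [decriptChunks]
  | [a] => by simp [decriptChunks, List.range_succ, decriptStep]
  | a :: b :: rest => by
      have ih := fill_eq rest
      have hM : (rest.length + 2 + 1) / 2 = (rest.length + 1) / 2 + 1 := by omega
      have hrange : List.range (rest.length + 2)
          = 0 :: 1 :: (List.range rest.length).map (fun i => i + 2) := by
        rw [List.range_succ_eq_map, List.range_succ_eq_map, List.map_cons, List.map_map]
        rfl
      show (List.range (rest.length + 2)).foldl (decriptStep (a :: b :: rest))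
          (List.replicate ((rest.length + 2 + 1) / 2) []) = _
      rw [hM, hrange, List.replicate_succ]
      simp only [List.foldl_cons]
      have h0 : decriptStep (a :: b :: rest)
          (([] : List Char) :: List.replicate ((rest.length + 1) / 2) []) 0
          = [a] :: List.replicate ((rest.length + 1) / 2) [] := by
        simp [decriptStep, List.getD]
      have h1 : decriptStep (a :: b :: rest)
          (([a]) :: List.replicate ((rest.length + 1) / 2) []) 1
          = [a, b] :: List.replicate ((rest.length + 1) / 2) [] := by
        simp [decriptStep, List.getD]
      rw [h0, h1, fill_shift]
      simp [decriptChunks, ih]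
termination_by cs => cs.length

theorem replicate_as_rangeMap (n : Nat) :
    (List.range n).map (fun _ => ([] : List Char)) = List.replicate n [] := by
  induction n with
  | zero => simp
  | succ n ih => simp [List.range_succ, ih, List.replicate_succ']

theorem decript_spec : Claim_equal_decript := by
  intro s _
  unfold Spec_decript decript decript_alt
  simp only [replicate_as_rangeMap, fill_eq, foldl_revapp, List.nil_append]
  congr 1
  rw [List.reverse_flatten]
  simp [List.map_map]
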